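-- pv_equiv track=rewrite | github.com/ripthetoilet/crypto-FB-9 | cp2/Tishkov_Papucha_FB_93_cp2/Lab2.py | divide_to_blocks
-- ===== SOURCE A (Python) =====
-- def divide_to_blocks(text, num):
--     text_blocks_list = []
--     for i in range(0, num):
--         let_num = i
--         new_block = []
--         while let_num < len(text):
--             new_block.append(text[let_num])
--             let_num += num
--         text_blocks_list.append(''.join(new_block))
--     return text_blocks_list
-- ===== SOURCE B (Python) =====
-- def divide_to_blocks(text, num):
--     if num <= 0:
--         return []
--     blocks = [[] for _ in range(num)]
--     for j, ch in enumerate(text):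
--         blocks[j % num].append(ch)
--     return [''.join(b) for b in blocks]
-- ===== Notes on version B (the rewrite author's own statement) =====
-- stated objective: alternative
-- what changed: Replaces the num strided passes over the text (one inner while-walk per block) by a single flat distribution pass: one enumerate loop appending each character to block j % num, then joining the blocks.
import Mathlib
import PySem

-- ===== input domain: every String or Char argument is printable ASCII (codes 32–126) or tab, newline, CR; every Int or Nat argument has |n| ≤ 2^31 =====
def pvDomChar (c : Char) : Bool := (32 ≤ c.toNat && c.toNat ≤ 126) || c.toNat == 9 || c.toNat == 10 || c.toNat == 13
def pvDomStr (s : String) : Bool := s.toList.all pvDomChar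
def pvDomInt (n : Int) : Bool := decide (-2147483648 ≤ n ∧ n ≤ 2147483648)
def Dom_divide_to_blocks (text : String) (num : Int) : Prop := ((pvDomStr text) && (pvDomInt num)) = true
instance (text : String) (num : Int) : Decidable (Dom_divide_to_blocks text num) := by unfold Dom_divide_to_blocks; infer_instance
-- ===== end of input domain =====

-- B replaces A's num strided block-building passes over the text by one flat distribution pass
-- (each character goes to block j % num); same cost, different traversal shape. Both are total.

-- ===== PORT A =====
-- the inner 'while let_num < len(text): new_block.append(text[let_num]); let_num += num' loop.
-- The '1 ≤ num' conjunct in the guard is ONLY a termination guard (fuel-like): in A the loop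
-- body runs solely for i from range(0, num), which is nonempty only when 1 ≤ num.
def pvInnerA (cs : List Char) (num : Int) (letNum : Int) : List Char :=
  if _h : letNum < (cs.length : Int) ∧ 1 ≤ num then
    match PySem.List.pyGet? cs letNum with
    | some ch => ch :: pvInnerA cs num (letNum + num)
    | none => []
  else []
termination_by ((cs.length : Int) - letNum).toNat
decreasing_by omega

def divide_to_blocks (text : String) (num : Int) : List String :=
  (PySem.List.pyRange 0 num 1).foldl
    (fun acc i => acc ++ [String.ofList (pvInnerA text.toList num i)]) []

-- ===== PORT B =====
-- one step of B's loop: blocks[j % num].append(ch)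
def pvStepB (num : Int) (bs : List (List Char)) (p : Int × Char) : List (List Char) :=
  bs.set (PySem.Int.mod p.1 num).toNat ((bs.getD (PySem.Int.mod p.1 num).toNat []) ++ [p.2])

def divide_to_blocks_alt (text : String) (num : Int) : List String :=
  if num ≤ 0 then []
  else
    ((PySem.List.enumerate text.toList 0).foldl (pvStepB num)
      (List.replicate num.toNat ([] : List Char))).map (fun b => String.ofList b)

-- ===== PRECONDITION & SPEC =====
def Spec_divide_to_blocks (text : String) (num : Int) (out : List String) : Prop := out = divide_to_blocks_alt text num
instance (text : String) (num : Int) (out : List String) : Decidable (Spec_divide_to_blocks text num out) := by unfold Spec_divide_to_blocks; infer_instance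

-- ===== CLAIM (what is proved, stated in full; the proofs are below) =====
def Claim_equal_divide_to_blocks : Prop := ∀ (text : String) (num : Int), Dom_divide_to_blocks text num → Spec_divide_to_blocks text num (divide_to_blocks text num)

-- ===== LEMMAS AND PROOFS =====

lemma pvInnerA_eq (cs : List Char) (num s : Int) :
    pvInnerA cs num s = if s < (cs.length : Int) ∧ 1 ≤ num then
      (match PySem.List.pyGet? cs s with
       | some ch => ch :: pvInnerA cs num (s + num)
       | none => []) else [] := by
  rw [pvInnerA]
  split <;> rfl

lemma pvInnerA_nil (num s : Int) : pvInnerA [] num s = [] := by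
  have h0 : PySem.List.pyGet? ([] : List Char) s = none := by simp [PySem.List.pyGet?]
  rw [pvInnerA_eq]
  simp only [h0]
  split <;> rfl

lemma pvSet_map_range {α : Type} (f : Nat → α) (n m : Nat) (v : α) (_hm : m < n) :
    ((List.range n).map f).set m v = (List.range n).map (fun k => if k = m then v else f k) := by
  apply List.ext_getElem
  · simp
  · intro i h1 h2
    simp only [List.length_map, List.length_range] at h2
    simp only [List.getElem_set, List.getElem_map, List.getElem_range]
    split_ifs with ha hb hb
    · rfl
    · exact absurd ha.symm hb
    · exact absurd hb.symm ha
    · rfl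

-- appending one character to the text appends it to exactly the walk that reaches index ds.length
lemma pvInnerA_append (ds : List Char) (c : Char) (num : Int) (hn : 1 ≤ num) :
    ∀ (f : Nat) (s : Int), 0 ≤ s → (((ds.length : Int) + 1 - s).toNat ≤ f) →
      pvInnerA (ds ++ [c]) num s =
        pvInnerA ds num s ++
          (if (ds.length : Int) % num = s % num ∧ s ≤ (ds.length : Int) then [c] else []) := by
  intro f
  induction f with
  | zero =>
    intro s hs hf
    have hlen : ((ds.length : Int)) < s := by omega
    rw [pvInnerA_eq ds num s, if_neg (by omega)]
    rw [pvInnerA_eq (ds ++ [c]) num s, if_neg (by simp; omega)]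
    rw [if_neg (fun hcon => absurd hcon.2 (by omega))]
    rfl
  | succ f ih =>
    intro s hs hf
    by_cases hcase : s < (ds.length : Int)
    · -- both guards hold; heads agree, recurse
      have hsn : s.toNat < ds.length := by omega
      have hseq : s = ((s.toNat : Nat) : Int) := by omega
      have hg1 : PySem.List.pyGet? (ds ++ [c]) s = ds[s.toNat]? := by
        conv_lhs => rw [hseq]
        rw [PySem.List.pyGet?_natCast, List.getElem?_append_left hsn]
      have hg2 : PySem.List.pyGet? ds s = ds[s.toNat]? := by
        conv_lhs => rw [hseq]
        rw [PySem.List.pyGet?_natCast]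
      have hsome : ds[s.toNat]? = some ds[s.toNat] := List.getElem?_eq_getElem hsn
      rw [pvInnerA_eq (ds ++ [c]) num s, if_pos (by simp; omega)]
      rw [pvInnerA_eq ds num s, if_pos ⟨hcase, hn⟩]
      simp only [hg1, hg2, hsome]
      rw [ih (s + num) (by omega) (by omega)]
      have hmod : (s + num) % num = s % num := Int.add_emod_right s num
      have hiff : ((ds.length : Int) % num = (s + num) % num ∧ s + num ≤ (ds.length : Int))
          ↔ ((ds.length : Int) % num = s % num ∧ s ≤ (ds.length : Int)) := by
        rw [hmod]
        constructor
        · rintro ⟨h1, h2⟩; exact ⟨h1, by omega⟩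
        · rintro ⟨h1, h2⟩
          refine ⟨h1, ?_⟩
          have hz : ((ds.length : Int) - s) % num = 0 := by
            rw [Int.sub_emod, h1, sub_self, Int.zero_emod]
          have hdvd : num ∣ ((ds.length : Int) - s) := Int.dvd_of_emod_eq_zero hz
          have hle : num ≤ (ds.length : Int) - s := Int.le_of_dvd (by omega) hdvd
          omega
      simp only [hiff, List.cons_append]
    · -- s ≥ len: the original walk is empty here
      rw [pvInnerA_eq ds num s, if_neg (by omega)]
      by_cases heq : s = (ds.length : Int)
      · subst heq
        rw [pvInnerA_eq (ds ++ [c]) num ((ds.length : Nat) : Int), if_pos (by simp; omega)]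
        have hg : PySem.List.pyGet? (ds ++ [c]) ((ds.length : Nat) : Int) = some c := by
          rw [PySem.List.pyGet?_natCast]
          rw [List.getElem?_eq_getElem (by simp)]
          rw [List.getElem_concat_length rfl]
        simp only [hg]
        rw [pvInnerA_eq (ds ++ [c]) num ((ds.length : Int) + num), if_neg (by simp; omega)]
        simp
      · rw [pvInnerA_eq (ds ++ [c]) num s, if_neg (by simp; omega)]
        rw [if_neg (fun hcon => absurd hcon.2 (by omega))]
        rfl

-- the distribution fold computes exactly the family of strided walks
lemma pvMain (n : Nat) (hn : 1 ≤ n) (cs : List Char) :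
    (PySem.List.enumerate cs 0).foldl (pvStepB (n : Int)) (List.replicate n ([] : List Char)) =
      (List.range n).map (fun (k : Nat) => pvInnerA cs (n : Int) (k : Int)) := by
  induction cs using List.reverseRecOn with
  | nil =>
    simp [PySem.List.enumerate_nil, pvInnerA_nil, List.map_const']
  | append_singleton ds c ih =>
    rw [PySem.List.enumerate_append, List.foldl_append, ih]
    simp only [PySem.List.enumerate_cons, PySem.List.enumerate_nil, List.foldl_cons,
      List.foldl_nil]
    have hmodcast : PySem.Int.mod ((0 : Int) + (ds.length : Int)) (n : Int)
        = (((ds.length % n : Nat)) : Int) := by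
      rw [zero_add]; exact PySem.Int.mod_natCast ds.length n
    have hmlt : ds.length % n < n := Nat.mod_lt _ (by omega)
    unfold pvStepB
    rw [hmodcast]
    simp only [Int.toNat_natCast]
    rw [PySem.List.getD_map_range _ _ _ _ hmlt]
    rw [pvSet_map_range _ _ _ _ hmlt]
    apply List.ext_getElem
    · simp
    · intro i h1 h2
      simp only [List.length_map, List.length_range] at h2
      simp only [List.getElem_map, List.getElem_range]
      rw [pvInnerA_append ds c (n : Int) (by omega) (ds.length + 1) (i : Int)
        (by omega) (by omega)]
      have e1 : i % n = i := Nat.mod_eq_of_lt h2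
      have e2 : ds.length % n ≤ ds.length := Nat.mod_le _ _
      have hcond : ((ds.length : Int) % (n : Int) = (i : Int) % (n : Int)
            ∧ (i : Int) ≤ (ds.length : Int)) ↔ i = ds.length % n := by
        rw [← Int.natCast_mod, ← Int.natCast_mod, Nat.cast_inj, Nat.cast_le, e1]
        constructor
        · rintro ⟨hx, _⟩; exact hx.symm
        · intro hx; exact ⟨hx.symm, hx ▸ e2⟩
      by_cases hc : i = ds.length % n
      · rw [if_pos hc, if_pos (hcond.mpr hc), hc]
      · rw [if_neg hc, if_neg (fun h => hc (hcond.mp h)), List.append_nil]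

-- ===== VERDICT (by name: the statement is the Claim_ definition above) =====
theorem divide_to_blocks_spec : Claim_equal_divide_to_blocks := by
  intro text num _
  unfold Spec_divide_to_blocks divide_to_blocks divide_to_blocks_alt
  by_cases hn : num ≤ 0
  · rw [if_pos hn, PySem.List.pyRange_one_eq_nil hn]
    rfl
  · rw [if_neg hn]
    obtain ⟨n, rfl⟩ : ∃ n : Nat, num = (n : Int) := ⟨num.toNat, by omega⟩
    simp only [Int.toNat_natCast]
    rw [pvMain n (by omega) text.toList]
    rw [PySem.List.foldl_append_singleton_eq_map, PySem.List.pyRange_one]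
    simp [List.map_map, Function.comp]
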